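-- pv_equiv track=rewrite | github.com/HaseebUlBashar/CSE221 | Assignment 5.py | dfs
-- ===== SOURCE A (Python) =====
-- def dfs(x, y, grid, visited):
--     stack = [(x, y)]
--     visited[x][y] = True
--     diamond_count = 0
--     directions = [(-1, 0), (1, 0), (0, -1), (0, 1)]
--
--     while stack:
--         cx, cy = stack.pop()
--         if grid[cx][cy] == 'D':
--             diamond_count += 1
--
--         for dx, dy in directions:
--             nx, ny = cx + dx, cy + dy
--             if 0 <= nx < len(grid) and 0 <= ny < len(grid[0]) and not visited[nx][ny] and grid[nx][ny] != '#':
--                 visited[nx][ny] = True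
--                 stack.append((nx, ny))
--
--     return diamond_count
-- ===== SOURCE B (Python) =====
-- def dfs(x, y, grid, visited):
--     # Recursive flood fill: mark the cell, then add the counts of the four
--     # recursive explorations; the count is threaded through the call tree
--     # instead of an explicit stack with an accumulator.
--     visited[x][y] = True
--     count = 1 if grid[x][y] == 'D' else 0
--     for dx, dy in ((-1, 0), (1, 0), (0, -1), (0, 1)):
--         nx, ny = x + dx, y + dy
--         if 0 <= nx < len(grid) and 0 <= ny < len(grid[0]) and not visited[nx][ny] and grid[nx][ny] != '#':
--             count += dfs(nx, ny, grid, visited)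
--     return count
-- ===== Notes on version B (the rewrite author's own statement) =====
-- stated objective: alternative
-- what changed: B replaces A's iterative worklist (an explicit stack plus a count accumulator mutated in a while loop) by a recursive flood fill: mark the cell, start from 1 or 0 for the cell itself, and add the value of a recursive call for each admissible neighbour, threading the count through the call tree.
-- outside the precondition, e.g. on dfs(0, 0, [['D']], [[False], [False]]): A returns 1, B returns 1
import Mathlib
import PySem

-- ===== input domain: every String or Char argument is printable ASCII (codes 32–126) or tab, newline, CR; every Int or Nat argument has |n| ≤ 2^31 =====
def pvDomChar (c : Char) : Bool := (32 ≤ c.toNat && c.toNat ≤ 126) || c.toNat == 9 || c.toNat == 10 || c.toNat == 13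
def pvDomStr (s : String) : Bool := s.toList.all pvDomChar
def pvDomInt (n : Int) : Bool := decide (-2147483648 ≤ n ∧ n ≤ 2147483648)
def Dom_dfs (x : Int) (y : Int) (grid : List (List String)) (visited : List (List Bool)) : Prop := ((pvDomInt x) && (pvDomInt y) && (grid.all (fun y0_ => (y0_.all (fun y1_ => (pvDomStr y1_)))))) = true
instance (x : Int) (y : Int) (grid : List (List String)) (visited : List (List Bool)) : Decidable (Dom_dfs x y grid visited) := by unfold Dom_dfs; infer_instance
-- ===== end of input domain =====

-- B replaces A's iterative worklist (explicit stack + count accumulator in a while loop) by a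
-- recursive flood fill that threads the count through the call tree — objective: alternative.
-- Both Pythons mutate `visited` in place identically; only the RETURN value is claimed and proved here.

-- ===== PORT A =====
-- visited[i][j] (read; on Pre_ inputs every read below is in range, so the default is never reached)
def pvGetB (v : List (List Bool)) (i j : Int) : Bool :=
  PySem.List.pyGetD (PySem.List.pyGetD v i ([] : List Bool)) j false

-- visited[i][j] = True (Python index semantics incl. negative wrap; a no-op exactly where
-- Python raises IndexError, which Pre_ excludes)
def pvSetB (v : List (List Bool)) (i j : Int) : List (List Bool) :=
  PySem.List.pySetD v i (PySem.List.pySetD (PySem.List.pyGetD v i ([] : List Bool)) j true)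

-- grid[i][j]
def pvGetS (g : List (List String)) (i j : Int) : String :=
  PySem.List.pyGetD (PySem.List.pyGetD g i ([] : List String)) j ""

-- len(grid[0])
def pvCols (g : List (List String)) : Int := ((PySem.List.pyGetD g 0 ([] : List String)).length : Int)

-- number of False entries of `visited`: used only to compute the fuel of the loops/recursions
-- below; the fuel is proven sufficient on Pre_ inputs (each step that recurses/pushes first flips
-- a False cell to True), so the 0-fuel branch is never taken there
def pvFalses (v : List (List Bool)) : Nat := (v.map (fun r => r.count false)).sum

-- A's while-loop: pop from the end; count 'D'; eagerly guard, mark and push each of the four neighbours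
def pvLoopA : Nat → List (Int × Int) → List (List String) → List (List Bool) → Int → Int
  | 0, _, _, _, cnt => cnt
  | f+1, stack, grid, v, cnt =>
    match stack.getLast? with
    | none => cnt
    | some c =>
      let cnt' := if pvGetS grid c.1 c.2 = "D" then cnt + 1 else cnt
      let p := ([((-1 : Int), (0 : Int)), (1, 0), (0, -1), (0, 1)]).foldl
        (fun (acc : List (List Bool) × List (Int × Int)) d =>
          let nx := c.1 + d.1
          let ny := c.2 + d.2
          if 0 ≤ nx ∧ nx < (grid.length : Int) ∧ 0 ≤ ny ∧ ny < pvCols grid ∧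
              pvGetB acc.1 nx ny = false ∧ pvGetS grid nx ny ≠ "#" then
            (pvSetB acc.1 nx ny, acc.2 ++ [(nx, ny)])
          else acc)
        (v, stack.dropLast)
      pvLoopA f p.2 grid p.1 cnt'

def dfs (x : Int) (y : Int) (grid : List (List String)) (visited : List (List Bool)) : Int :=
  let v1 := pvSetB visited x y
  pvLoopA (2 * pvFalses v1 + 2) [(x, y)] grid v1 0

-- ===== PORT B =====
-- B's recursion: mark the cell, start from 1/0 for the cell itself, then walk the four
-- directions in order, recursing into each admissible neighbour and threading the mutated
-- `visited` (second component) and adding the returned count (first component)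
mutual
def pvDfsB : Nat → Int → Int → List (List String) → List (List Bool) → Int × List (List Bool)
  | 0, _, _, _, v => (0, v)
  | f+1, x, y, g, v =>
    pvDfsBDirs f x y g [((-1 : Int), (0 : Int)), (1, 0), (0, -1), (0, 1)]
      ((if pvGetS g x y = "D" then 1 else 0), pvSetB v x y)
  termination_by f _ _ _ _ => (f, 0)

def pvDfsBDirs : Nat → Int → Int → List (List String) → List (Int × Int) →
    Int × List (List Bool) → Int × List (List Bool)
  | _, _, _, _, [], acc => acc
  | f, x, y, g, d :: ds, acc =>
    let nx := x + d.1
    let ny := y + d.2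
    if 0 ≤ nx ∧ nx < (g.length : Int) ∧ 0 ≤ ny ∧ ny < pvCols g ∧
        pvGetB acc.2 nx ny = false ∧ pvGetS g nx ny ≠ "#" then
      let r := pvDfsB f nx ny g acc.2
      pvDfsBDirs f x y g ds (acc.1 + r.1, r.2)
    else pvDfsBDirs f x y g ds acc
  termination_by f _ _ _ ds _ => (f, ds.length + 1)
end

def dfs_alt (x : Int) (y : Int) (grid : List (List String)) (visited : List (List Bool)) : Int :=
  (pvDfsB (pvFalses (pvSetB visited x y) + 1) x y grid visited).1

-- ===== PRECONDITION & SPEC =====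
-- Pre_ excludes the inputs on which Python raises IndexError (empty grid, start coordinates
-- outside the wrap range, bounds checks reading past short rows) and also — a stated narrowing —
-- ragged grids and visited/grid shape mismatches, on some of which A still returns: there
-- Python's checks mix len(grid), len(grid[0]) and visited's own row lengths, so the value
-- depends on incidental row lengths (B agrees with A on those inputs too, but the theorems
-- below do not cover them).
def Pre_dfs (x : Int) (y : Int) (grid : List (List String)) (visited : List (List Bool)) : Prop :=
  grid ≠ [] ∧ (∀ r ∈ grid, (r.length : Int) = pvCols grid) ∧
  visited.length = grid.length ∧ (∀ r ∈ visited, (r.length : Int) = pvCols grid) ∧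
  -(grid.length : Int) ≤ x ∧ x < (grid.length : Int) ∧ -(pvCols grid) ≤ y ∧ y < pvCols grid
instance (x : Int) (y : Int) (grid : List (List String)) (visited : List (List Bool)) : Decidable (Pre_dfs x y grid visited) := by unfold Pre_dfs; infer_instance

def pvWitness_dfs : Int × Int × List (List String) × List (List Bool) :=
  (0, 0, [["D", "#"], [".", "D"]], [[false, false], [false, false]])

def Spec_dfs (x : Int) (y : Int) (grid : List (List String)) (visited : List (List Bool)) (out : Int) : Prop := out = dfs_alt x y grid visited
instance (x : Int) (y : Int) (grid : List (List String)) (visited : List (List Bool)) (out : Int) : Decidable (Spec_dfs x y grid visited out) := by unfold Spec_dfs; infer_instance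

-- ===== CLAIM (what is proved, stated in full; the proofs are below) =====
def Claim_equal_dfs : Prop := ∀ (x : Int) (y : Int) (grid : List (List String)) (visited : List (List Bool)), Dom_dfs x y grid visited → Pre_dfs x y grid visited → Spec_dfs x y grid visited (dfs x y grid visited)

-- ===== LEMMAS AND PROOFS =====

theorem getD_set_eq {α : Type} (l : List α) (i j : Nat) (a d : α) :
    (l.set i a).getD j d = if i = j ∧ i < l.length then a else l.getD j d := by
  rw [List.getD_eq_getElem?_getD, List.getD_eq_getElem?_getD, List.getElem?_set]
  split_ifs with h1 h2 h3 <;> simp_all <;> omega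

theorem pv_getB_nonneg (v : List (List Bool)) {i j : Int} (hi : 0 ≤ i) (hj : 0 ≤ j) :
    pvGetB v i j = (v.getD i.toNat []).getD j.toNat false := by
  unfold pvGetB PySem.List.pyGetD
  rw [PySem.List.pyGet?_of_nonneg _ hi, PySem.List.pyGet?_of_nonneg _ hj]
  simp [List.getD_eq_getElem?_getD]

theorem pv_setB_eq (v : List (List Bool)) {i j : Int} (hi : 0 ≤ i) (hj : 0 ≤ j) :
    pvSetB v i j = v.set i.toNat ((v.getD i.toNat []).set j.toNat true) := by
  unfold pvSetB PySem.List.pyGetD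
  rw [PySem.List.pySetD_of_nonneg _ _ hi, PySem.List.pySetD_of_nonneg _ _ hj,
    PySem.List.pyGet?_of_nonneg _ hi]
  simp [List.getD_eq_getElem?_getD]

def pvInR (g : List (List String)) (c : Int × Int) : Prop :=
  0 ≤ c.1 ∧ c.1 < (g.length : Int) ∧ 0 ≤ c.2 ∧ c.2 < pvCols g
def pvShape (g : List (List String)) (v : List (List Bool)) : Prop :=
  v.length = g.length ∧ ∀ r ∈ v, (r.length : Int) = pvCols g
def pvMark (N : List (Int × Int)) (v : List (List Bool)) : List (List Bool) :=
  N.foldl (fun v c => pvSetB v c.1 c.2) v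

theorem pv_shape_set {g : List (List String)} {v : List (List Bool)} (i j : Int)
    (hs : pvShape g v) (hi : -(v.length : Int) ≤ i) (hi' : i < (v.length : Int)) :
    pvShape g (pvSetB v i j) := by
  obtain ⟨hlen, hrow⟩ := hs
  constructor
  · show (pvSetB v i j).length = _
    unfold pvSetB; rw [PySem.List.length_pySetD]; exact hlen
  · intro r hr
    unfold pvSetB at hr
    have hmem : r ∈ v ∨ r = PySem.List.pySetD (PySem.List.pyGetD v i []) j true := by
      rcases h : PySem.List.pyIdx? v.length i with _ | k
      · simp [PySem.List.pySetD, PySem.List.pySet?, h] at hr; exact Or.inl hr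
      · simp [PySem.List.pySetD, PySem.List.pySet?, h] at hr
        exact List.mem_or_eq_of_mem_set hr
    rcases hmem with hmem | hmem
    · exact hrow r hmem
    · subst hmem
      rw [PySem.List.length_pySetD]
      exact hrow _ (PySem.List.pyGetD_mem v _ ⟨hi, hi'⟩)

theorem pv_getB_set {g : List (List String)} {v : List (List Bool)} {c a : Int × Int}
    (hs : pvShape g v) (hc : pvInR g c) (ha : pvInR g a) :
    pvGetB (pvSetB v c.1 c.2) a.1 a.2 = (pvGetB v a.1 a.2 || decide (a = c)) := by
  obtain ⟨hlen, hrow⟩ := hs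
  obtain ⟨hc1, hc2, hc3, hc4⟩ := hc
  obtain ⟨ha1, ha2, ha3, ha4⟩ := ha
  have hc2' : c.1.toNat < v.length := by omega
  have hrmem : v.getD c.1.toNat [] ∈ v := by
    rw [List.getD_eq_getElem?_getD, List.getElem?_eq_getElem hc2']
    exact List.getElem_mem hc2'
  have hrl : ((v.getD c.1.toNat []).length : Int) = pvCols g := hrow _ hrmem
  rw [pv_setB_eq v hc1 hc3, pv_getB_nonneg _ ha1 ha3, pv_getB_nonneg _ ha1 ha3,
    getD_set_eq]
  split_ifs with h1
  · have he1 : a.1 = c.1 := by omega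
    rw [getD_set_eq]
    split_ifs with h2
    · have : a = c := by
        have : a.2 = c.2 := by omega
        exact Prod.ext he1 this
      simp [this]
    · have hne : ¬ (a = c) := by
        intro h; subst h; exact h2 ⟨rfl, by omega⟩
      simp [hne, he1]
  · have hne : ¬ (a = c) := by
      intro h; subst h; exact h1 ⟨rfl, by omega⟩
    simp [hne]

theorem count_false_set : ∀ (r : List Bool) (j : Nat), j < r.length → r.getD j false = false →
    (r.set j true).count false + 1 = r.count false := by
  intro r
  induction r with
  | nil => intro j hj; simp at hj
  | cons b t ih =>
    intro j hj hf
    cases j with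
    | zero => simp_all [List.count_cons]
    | succ j =>
      simp only [List.set_cons_succ, List.count_cons]
      have := ih j (by simpa using hj) (by simpa using hf)
      omega

theorem sum_map_falses_set : ∀ (v : List (List Bool)) (n : Nat) (r' : List Bool), n < v.length →
    ((v.set n r').map (fun r => r.count false)).sum + (v.getD n []).count false
      = (v.map (fun r => r.count false)).sum + r'.count false := by
  intro v
  induction v with
  | nil => intro n r hn; simp at hn
  | cons h t ih =>
    intro n r' hn
    cases n with
    | zero => simp [List.getD_cons_zero]; omega
    | succ n =>
      simp only [List.set_cons_succ, List.map_cons, List.sum_cons, List.getD_cons_succ]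
      have := ih n r' (by simpa using hn)
      omega

theorem pv_falses_set {g : List (List String)} {v : List (List Bool)} {c : Int × Int}
    (hs : pvShape g v) (hc : pvInR g c) (hf : pvGetB v c.1 c.2 = false) :
    pvFalses (pvSetB v c.1 c.2) + 1 = pvFalses v := by
  obtain ⟨hlen, hrow⟩ := hs
  obtain ⟨hc1, hc2, hc3, hc4⟩ := hc
  have hc2' : c.1.toNat < v.length := by omega
  have hrmem : v.getD c.1.toNat [] ∈ v := by
    rw [List.getD_eq_getElem?_getD, List.getElem?_eq_getElem hc2']
    exact List.getElem_mem hc2'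
  have hrl : ((v.getD c.1.toNat []).length : Int) = pvCols g := hrow _ hrmem
  rw [pv_getB_nonneg _ hc1 hc3] at hf
  rw [pv_setB_eq v hc1 hc3]
  unfold pvFalses
  have h1 := sum_map_falses_set v c.1.toNat ((v.getD c.1.toNat []).set c.2.toNat true) hc2'
  have h2 := count_false_set (v.getD c.1.toNat []) c.2.toNat (by omega) hf
  omega

theorem pv_falses_pos {g : List (List String)} {v : List (List Bool)} {c : Int × Int}
    (hs : pvShape g v) (hc : pvInR g c) (hf : pvGetB v c.1 c.2 = false) :
    1 ≤ pvFalses v := by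
  obtain ⟨hlen, hrow⟩ := hs
  obtain ⟨hc1, hc2, hc3, hc4⟩ := hc
  have hc2' : c.1.toNat < v.length := by omega
  have hrmem : v.getD c.1.toNat [] ∈ v := by
    rw [List.getD_eq_getElem?_getD, List.getElem?_eq_getElem hc2']
    exact List.getElem_mem hc2'
  have hrl : ((v.getD c.1.toNat []).length : Int) = pvCols g := hrow _ hrmem
  rw [pv_getB_nonneg _ hc1 hc3] at hf
  have hj : c.2.toNat < (v.getD c.1.toNat []).length := by omega
  have hmemf : false ∈ v.getD c.1.toNat [] := by
    rw [List.getD_eq_getElem?_getD, List.getElem?_eq_getElem hj] at hf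
    simp at hf
    rw [← hf]
    exact List.getElem_mem hj
  have hcnt : 1 ≤ (v.getD c.1.toNat []).count false := List.one_le_count_iff.mpr hmemf
  have hmem2 : (v.getD c.1.toNat []).count false ∈ v.map (fun r => r.count false) :=
    List.mem_map_of_mem hrmem
  have := List.single_le_sum (l := v.map (fun r => r.count false)) (by intro x _; omega) _ hmem2
  unfold pvFalses
  omega

theorem pv_shape_mark {g : List (List String)} {N : List (Int × Int)} :
    ∀ {v : List (List Bool)}, pvShape g v → (∀ c ∈ N, pvInR g c) → pvShape g (pvMark N v) := by
  induction N with
  | nil => intro v hs _; simpa [pvMark] using hs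
  | cons n N ih =>
    intro v hs hN
    have hn := hN n List.mem_cons_self
    have hs' : pvShape g (pvSetB v n.1 n.2) :=
      pv_shape_set n.1 n.2 hs (by have := hn.1; omega) (by have := hn.2.1; have h2l := hs.1; omega)
    simpa [pvMark, List.foldl_cons] using ih hs' (fun c hc => hN c (List.mem_cons_of_mem _ hc))

theorem pv_getB_mark {g : List (List String)} {N : List (Int × Int)} :
    ∀ {v : List (List Bool)}, pvShape g v → (∀ c ∈ N, pvInR g c) → ∀ {a : Int × Int}, pvInR g a →
    pvGetB (pvMark N v) a.1 a.2 = (pvGetB v a.1 a.2 || decide (a ∈ N)) := by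
  induction N with
  | nil => intro v _ _ a _; simp [pvMark]
  | cons n N ih =>
    intro v hs hN a ha
    have hn := hN n List.mem_cons_self
    have hs' : pvShape g (pvSetB v n.1 n.2) :=
      pv_shape_set n.1 n.2 hs (by have := hn.1; omega) (by have := hn.2.1; have h2l := hs.1; omega)
    have h1 : pvMark (n :: N) v = pvMark N (pvSetB v n.1 n.2) := by simp [pvMark]
    rw [h1, ih hs' (fun c hc => hN c (List.mem_cons_of_mem _ hc)) ha,
      pv_getB_set hs hn ha]
    simp [List.mem_cons, Bool.or_assoc]

theorem pv_falses_mark {g : List (List String)} {N : List (Int × Int)} :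
    ∀ {v : List (List Bool)}, pvShape g v → (∀ c ∈ N, pvInR g c) → N.Nodup →
    (∀ c ∈ N, pvGetB v c.1 c.2 = false) →
    pvFalses (pvMark N v) + N.length = pvFalses v := by
  induction N with
  | nil => intro v _ _ _ _; simp [pvMark]
  | cons n N ih =>
    intro v hs hN hnd hu
    have hn := hN n List.mem_cons_self
    have hs' : pvShape g (pvSetB v n.1 n.2) :=
      pv_shape_set n.1 n.2 hs (by have := hn.1; omega) (by have := hn.2.1; have h2l := hs.1; omega)
    have h1 : pvMark (n :: N) v = pvMark N (pvSetB v n.1 n.2) := by simp [pvMark]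
    have hu' : ∀ c ∈ N, pvGetB (pvSetB v n.1 n.2) c.1 c.2 = false := by
      intro c hc
      rw [pv_getB_set hs hn (hN c (List.mem_cons_of_mem _ hc))]
      have hcn : ¬ (c = n) := by
        intro h; subst h; exact (List.nodup_cons.mp hnd).1 hc
      simp [hcn, hu c (List.mem_cons_of_mem _ hc)]
    have h2 := ih hs' (fun c hc => hN c (List.mem_cons_of_mem _ hc)) (List.nodup_cons.mp hnd).2 hu'
    have h3 := pv_falses_set hs hn (hu n List.mem_cons_self)
    rw [h1]
    simp only [List.length_cons]
    omega

def pvOk (g : List (List String)) (v : List (List Bool)) (c : Int × Int) : Prop :=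
  pvInR g c ∧ pvGetB v c.1 c.2 = false ∧ pvGetS g c.1 c.2 ≠ "#"
def pvNbrs (c : Int × Int) : List (Int × Int) :=
  [(c.1 - 1, c.2), (c.1 + 1, c.2), (c.1, c.2 - 1), (c.1, c.2 + 1)]
inductive pvRch (g : List (List String)) (v : List (List Bool)) (cs : List (Int × Int)) : (Int × Int) → Prop
  | base {c} : c ∈ cs → pvOk g v c → pvRch g v cs c
  | step {p q} : pvRch g v cs p → q ∈ pvNbrs p → pvOk g v q → pvRch g v cs q
def pvD (g : List (List String)) (c : Int × Int) : Int :=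
  if pvGetS g c.1 c.2 = "D" then 1 else 0
def pvDsum (g : List (List String)) (W : List (Int × Int)) : Int := (W.map (pvD g)).sum
noncomputable def pvDcnt (g : List (List String)) (X : Set (Int × Int)) : Int :=
  (({q | q ∈ X ∧ pvGetS g q.1 q.2 = "D"}).ncard : Int)

theorem pvRch_ok {g v cs q} (h : pvRch g v cs q) : pvOk g v q := by
  cases h <;> assumption

theorem pvRch_congr_mem {g v} {cs cs' : List (Int × Int)} (h : ∀ a, a ∈ cs ↔ a ∈ cs') {q} :
    pvRch g v cs q ↔ pvRch g v cs' q := by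
  constructor
  · intro hq
    induction hq with
    | base hm hok => exact pvRch.base ((h _).mp hm) hok
    | step _ hn hok ih => exact pvRch.step ih hn hok
  · intro hq
    induction hq with
    | base hm hok => exact pvRch.base ((h _).mpr hm) hok
    | step _ hn hok ih => exact pvRch.step ih hn hok

theorem pvRch_mono {g v} {cs cs' : List (Int × Int)} (h : ∀ a, a ∈ cs → a ∈ cs') {q}
    (hq : pvRch g v cs q) : pvRch g v cs' q := by
  induction hq with
  | base hm hok => exact pvRch.base (h _ hm) hok
  | step _ hn hok ih => exact pvRch.step ih hn hok

theorem pvRch_cons_not_ok {g v n} {ns : List (Int × Int)} (hn : ¬ pvOk g v n) {q} :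
    pvRch g v (n :: ns) q ↔ pvRch g v ns q := by
  constructor
  · intro hq
    induction hq with
    | base hm hok =>
      rcases List.mem_cons.mp hm with rfl | hm
      · exact absurd hok hn
      · exact pvRch.base hm hok
    | step _ hnb hok ih => exact pvRch.step ih hnb hok
  · exact pvRch_mono (fun a ha => List.mem_cons_of_mem _ ha)

theorem pv_eager {g : List (List String)} {v v' : List (List Bool)}
    {cs T N : List (Int × Int)}
    (hNc : ∀ n, n ∈ N ↔ (n ∈ cs ∧ pvOk g v n))
    (hv' : ∀ a, pvInR g a → pvGetB v' a.1 a.2 = (pvGetB v a.1 a.2 || decide (a ∈ N))) :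
    ∀ q, pvRch g v (cs ++ T) q ↔ (q ∈ N ∨ pvRch g v' (N.flatMap pvNbrs ++ T) q) := by
  have hok_fwd : ∀ {a}, pvOk g v a → a ∉ N → pvOk g v' a := by
    intro a hok hnm
    refine ⟨hok.1, ?_, hok.2.2⟩
    rw [hv' a hok.1, hok.2.1]
    simp [hnm]
  have hok_bwd : ∀ {a}, pvOk g v' a → pvOk g v a := by
    intro a hok
    refine ⟨hok.1, ?_, hok.2.2⟩
    have := hok.2.1
    rw [hv' a hok.1] at this
    exact (Bool.or_eq_false_iff.mp this).1
  intro q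
  constructor
  · intro hq
    induction hq with
    | @base c hm hok =>
      rcases List.mem_append.mp hm with hm | hm
      · exact Or.inl ((hNc _).mpr ⟨hm, hok⟩)
      · by_cases hN : c ∈ N
        · exact Or.inl hN
        · exact Or.inr (pvRch.base (List.mem_append_right _ hm) (hok_fwd hok hN))
    | @step p q hp hqn hok ih =>
      by_cases hN : q ∈ N
      · exact Or.inl hN
      · rcases ih with hpN | hp'
        · refine Or.inr (pvRch.base ?_ (hok_fwd hok hN))
          exact List.mem_append_left _ (List.mem_flatMap.mpr ⟨p, hpN, hqn⟩)
        · exact Or.inr (pvRch.step hp' hqn (hok_fwd hok hN))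
  · intro hq
    rcases hq with hq | hq
    · have := (hNc q).mp hq
      exact pvRch.base (List.mem_append_left _ this.1) this.2
    · induction hq with
      | base hm hok =>
        rcases List.mem_append.mp hm with hm | hm
        · obtain ⟨n, hnN, hrn⟩ := List.mem_flatMap.mp hm
          have hn := (hNc n).mp hnN
          exact pvRch.step (pvRch.base (List.mem_append_left _ hn.1) hn.2) hrn (hok_bwd hok)
        · exact pvRch.base (List.mem_append_right _ hm) (hok_bwd hok)
      | step _ hn hok ih => exact pvRch.step ih hn (hok_bwd hok)

-- sequential decomposition: if v' marks over v exactly the cells reachable from L1,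
-- then reachability from L1 ++ L2 in v splits into L1-in-v plus L2-in-v'
theorem pv_seq {g : List (List String)} {v v' : List (List Bool)} {L1 L2 : List (Int × Int)}
    (hchar : ∀ a : Int × Int, pvInR g a →
      (pvGetB v' a.1 a.2 = true ↔ pvGetB v a.1 a.2 = true ∨ pvRch g v L1 a)) :
    ∀ q, pvRch g v (L1 ++ L2) q ↔ (pvRch g v L1 q ∨ pvRch g v' L2 q) := by
  have hok_fwd : ∀ {a}, pvOk g v a → ¬ pvRch g v L1 a → pvOk g v' a := by
    intro a hok hnr
    refine ⟨hok.1, ?_, hok.2.2⟩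
    have h1 := hchar a hok.1
    have h2 : ¬ (pvGetB v' a.1 a.2 = true) := by
      rw [h1]
      rintro (h | h)
      · rw [hok.2.1] at h; exact Bool.false_ne_true h
      · exact hnr h
    exact Bool.not_eq_true _ ▸ (by simpa using h2)
  have hok_bwd : ∀ {a}, pvOk g v' a → (pvOk g v a ∧ ¬ pvRch g v L1 a) := by
    intro a hok
    have h1 := hchar a hok.1
    have h2 : ¬ (pvGetB v a.1 a.2 = true ∨ pvRch g v L1 a) := by
      rw [← h1, hok.2.1]
      exact Bool.false_ne_true
    push_neg at h2
    refine ⟨⟨hok.1, ?_, hok.2.2⟩, h2.2⟩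
    have := h2.1
    cases hb : pvGetB v a.1 a.2
    · rfl
    · exact absurd hb this
  intro q
  constructor
  · intro hq
    induction hq with
    | @base c hm hok =>
      rcases List.mem_append.mp hm with hm | hm
      · exact Or.inl (pvRch.base hm hok)
      · by_cases hr : pvRch g v L1 c
        · exact Or.inl hr
        · exact Or.inr (pvRch.base hm (hok_fwd hok hr))
    | @step p q hp hqn hok ih =>
      by_cases hr : pvRch g v L1 q
      · exact Or.inl hr
      · rcases ih with hl | hrr
        · exact absurd (pvRch.step hl hqn hok) hr
        · exact Or.inr (pvRch.step hrr hqn (hok_fwd hok hr))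
  · rintro (hq | hq)
    · exact pvRch_mono (fun a ha => List.mem_append_left _ ha) hq
    · induction hq with
      | base hm hok => exact pvRch.base (List.mem_append_right _ hm) (hok_bwd hok).1
      | step _ hn hok ih => exact pvRch.step ih hn (hok_bwd hok).1

theorem pvRch_finite (g : List (List String)) (v : List (List Bool)) (cs : List (Int × Int)) :
    {q | pvRch g v cs q}.Finite := by
  apply Set.Finite.subset (Set.finite_Icc ((0 : Int), (0 : Int)) ((g.length : Int) - 1, pvCols g - 1))
  intro q hq
  have h := (pvRch_ok hq).1
  obtain ⟨h1, h2, h3, h4⟩ := h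
  simp only [Set.mem_Icc, Prod.le_def]
  omega

theorem pvDcnt_empty (g : List (List String)) : pvDcnt g ∅ = 0 := by
  unfold pvDcnt
  simp

theorem pvDcnt_insert {g : List (List String)} {c : Int × Int} {X : Set (Int × Int)}
    (hc : c ∉ X) (hX : X.Finite) : pvDcnt g (insert c X) = pvD g c + pvDcnt g X := by
  unfold pvDcnt pvD
  have hfin : ({q | q ∈ X ∧ pvGetS g q.1 q.2 = "D"}).Finite :=
    hX.subset (fun q hq => hq.1)
  by_cases hD : pvGetS g c.1 c.2 = "D"
  · have hset : {q | q ∈ insert c X ∧ pvGetS g q.1 q.2 = "D"}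
        = insert c {q | q ∈ X ∧ pvGetS g q.1 q.2 = "D"} := by
      ext q
      simp only [Set.mem_setOf_eq, Set.mem_insert_iff]
      constructor
      · rintro ⟨hq | hq, hd⟩
        · exact Or.inl hq
        · exact Or.inr ⟨hq, hd⟩
      · rintro (rfl | ⟨hq, hd⟩)
        · exact ⟨Or.inl rfl, hD⟩
        · exact ⟨Or.inr hq, hd⟩
    rw [hset, Set.ncard_insert_of_notMem (fun h => hc h.1) hfin]
    simp [hD]
    push_cast
    ring
  · have hset : {q | q ∈ insert c X ∧ pvGetS g q.1 q.2 = "D"}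
        = {q | q ∈ X ∧ pvGetS g q.1 q.2 = "D"} := by
      ext q
      simp only [Set.mem_setOf_eq, Set.mem_insert_iff]
      constructor
      · rintro ⟨hq | hq, hd⟩
        · subst hq; exact absurd hd hD
        · exact ⟨hq, hd⟩
      · rintro ⟨hq, hd⟩; exact ⟨Or.inr hq, hd⟩
    rw [hset]
    simp [hD]

theorem pvDcnt_union {g : List (List String)} {X Y : Set (Int × Int)}
    (hd : ∀ q, q ∈ X → q ∉ Y) (hX : X.Finite) (hY : Y.Finite) :
    pvDcnt g (X ∪ Y) = pvDcnt g X + pvDcnt g Y := by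
  unfold pvDcnt
  have hset : {q | q ∈ X ∪ Y ∧ pvGetS g q.1 q.2 = "D"}
      = {q | q ∈ X ∧ pvGetS g q.1 q.2 = "D"} ∪ {q | q ∈ Y ∧ pvGetS g q.1 q.2 = "D"} := by
    ext q
    simp only [Set.mem_setOf_eq, Set.mem_union]
    tauto
  have hdisj : Disjoint {q | q ∈ X ∧ pvGetS g q.1 q.2 = "D"}
      {q | q ∈ Y ∧ pvGetS g q.1 q.2 = "D"} := by
    rw [Set.disjoint_left]
    intro q hq hq'
    exact hd q hq.1 hq'.1
  rw [hset, Set.ncard_union_eq hdisj (hX.subset fun q hq => hq.1) (hY.subset fun q hq => hq.1)]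
  push_cast
  ring

theorem pvDcnt_list_union {g : List (List String)} {X : Set (Int × Int)} {N : List (Int × Int)} :
    N.Nodup → (∀ c ∈ N, c ∉ X) → X.Finite →
    pvDcnt g ({q | q ∈ N} ∪ X) = pvDsum g N + pvDcnt g X := by
  induction N with
  | nil =>
    intro _ _ _
    have h0 : ({q | q ∈ ([] : List (Int × Int))} ∪ X) = X := by simp
    rw [h0]
    simp [pvDsum]
  | cons n N ih =>
    intro hnd hdisj hX
    have hset : ({q | q ∈ n :: N} ∪ X) = insert n ({q | q ∈ N} ∪ X) := by
      ext q
      simp [List.mem_cons, or_assoc]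
    have hnN : n ∉ ({q | q ∈ N} ∪ X) := by
      intro h
      rcases h with h | h
      · exact (List.nodup_cons.mp hnd).1 h
      · exact hdisj n List.mem_cons_self h
    have hfin : ({q | q ∈ N} ∪ X).Finite := (N.finite_toSet).union hX
    rw [hset, pvDcnt_insert hnN hfin,
      ih (List.nodup_cons.mp hnd).2 (fun c hc => hdisj c (List.mem_cons_of_mem _ hc)) hX]
    simp [pvDsum]
    ring

theorem pv_nbrs_nodup (c : Int × Int) : (pvNbrs c).Nodup := by
  simp [pvNbrs, Prod.ext_iff]
  omega

def pvOkDec (g : List (List String)) (v : List (List Bool)) (c : Int × Int) : Decidable (pvOk g v c) := by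
  unfold pvOk pvInR; infer_instance

theorem pvRch_nil {g v q} : ¬ pvRch g v ([] : List (Int × Int)) q := by
  intro h
  induction h with
  | base hm _ => simp at hm
  | step _ _ _ ih => exact ih

theorem pv_map_dirs (x y : Int) :
    ([((-1 : Int), (0 : Int)), (1, 0), (0, -1), (0, 1)]).map (fun d => (x + d.1, y + d.2))
      = pvNbrs (x, y) := by
  simp [pvNbrs, Prod.ext_iff]
  omega

theorem pv_foldA_gen {g : List (List String)} (c : Int × Int) :
    ∀ (ds : List (Int × Int)) (v : List (List Bool)) (st : List (Int × Int)), pvShape g v →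
    ((ds.map (fun d => (c.1 + d.1, c.2 + d.2))).Nodup) →
    (ds.foldl
      (fun (acc : List (List Bool) × List (Int × Int)) d =>
        if 0 ≤ c.1 + d.1 ∧ c.1 + d.1 < (g.length : Int) ∧ 0 ≤ c.2 + d.2 ∧ c.2 + d.2 < pvCols g ∧
            pvGetB acc.1 (c.1 + d.1) (c.2 + d.2) = false ∧ pvGetS g (c.1 + d.1) (c.2 + d.2) ≠ "#" then
          (pvSetB acc.1 (c.1 + d.1) (c.2 + d.2), acc.2 ++ [(c.1 + d.1, c.2 + d.2)])
        else acc)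
      (v, st))
    = (pvMark ((ds.map (fun d => (c.1 + d.1, c.2 + d.2))).filter (fun n => @decide (pvOk g v n) (pvOkDec g v n))) v,
       st ++ (ds.map (fun d => (c.1 + d.1, c.2 + d.2))).filter (fun n => @decide (pvOk g v n) (pvOkDec g v n))) := by
  intro ds
  induction ds with
  | nil => intro v st _ _; simp [pvMark]
  | cons d ds ih =>
    intro v st hs hnd
    have hcond : (0 ≤ c.1 + d.1 ∧ c.1 + d.1 < (g.length : Int) ∧ 0 ≤ c.2 + d.2 ∧
        c.2 + d.2 < pvCols g ∧ pvGetB v (c.1 + d.1) (c.2 + d.2) = false ∧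
        pvGetS g (c.1 + d.1) (c.2 + d.2) ≠ "#")
        ↔ pvOk g v (c.1 + d.1, c.2 + d.2) := by
      unfold pvOk pvInR
      tauto
    have hnd2 : ((c.1 + d.1, c.2 + d.2) ∉ ds.map (fun d' => (c.1 + d'.1, c.2 + d'.2))) ∧
        (ds.map (fun d' => (c.1 + d'.1, c.2 + d'.2))).Nodup := by simpa using hnd
    obtain ⟨hnotmem, hndtl⟩ := hnd2
    by_cases hok : pvOk g v (c.1 + d.1, c.2 + d.2)
    · have hs' : pvShape g (pvSetB v (c.1 + d.1) (c.2 + d.2)) :=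
        pv_shape_set _ _ hs (by have := hok.1.1; omega)
          (by have := hok.1.2.1; have := hs.1; omega)
      simp only [List.foldl_cons]
      rw [if_pos (hcond.mpr hok), ih _ _ hs' hndtl]
      have hfeq : (ds.map (fun d' => (c.1 + d'.1, c.2 + d'.2))).filter
            (fun n => @decide (pvOk g (pvSetB v (c.1 + d.1) (c.2 + d.2)) n) (pvOkDec g _ n))
          = (ds.map (fun d' => (c.1 + d'.1, c.2 + d'.2))).filter (fun n => @decide (pvOk g v n) (pvOkDec g v n)) := by
        apply List.filter_congr
        intro m hm
        by_cases hmR : pvInR g m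
        · have hmn : ¬ (m = (c.1 + d.1, c.2 + d.2)) := by
            intro h; subst h; exact hnotmem hm
          have hgb : pvGetB (pvSetB v (c.1 + d.1) (c.2 + d.2)) m.1 m.2 = pvGetB v m.1 m.2 := by
            rw [pv_getB_set hs hok.1 hmR]
            simp [hmn]
          simp [pvOk, hgb]
        · simp [pvOk, hmR]
      rw [hfeq]
      have hfcons : ((d :: ds).map (fun d' => (c.1 + d'.1, c.2 + d'.2))).filter
            (fun n => @decide (pvOk g v n) (pvOkDec g v n))
          = (c.1 + d.1, c.2 + d.2) ::
            (ds.map (fun d' => (c.1 + d'.1, c.2 + d'.2))).filter (fun n => @decide (pvOk g v n) (pvOkDec g v n)) := by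
        simp only [List.map_cons, List.filter_cons]
        rw [if_pos (by simpa using hok)]
      rw [hfcons]
      refine Prod.ext ?_ ?_
      · simp [pvMark]
      · simp
    · simp only [List.foldl_cons]
      rw [if_neg (fun h => hok (hcond.mp h)), ih _ _ hs hndtl]
      have hfcons : ((d :: ds).map (fun d' => (c.1 + d'.1, c.2 + d'.2))).filter
            (fun n => @decide (pvOk g v n) (pvOkDec g v n))
          = (ds.map (fun d' => (c.1 + d'.1, c.2 + d'.2))).filter (fun n => @decide (pvOk g v n) (pvOkDec g v n)) := by
        simp only [List.map_cons, List.filter_cons]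
        rw [if_neg (by simpa using hok)]
      rw [hfcons]

theorem pv_foldA {g : List (List String)} (c : Int × Int) (v : List (List Bool))
    (st : List (Int × Int)) (hs : pvShape g v) :
    (([((-1 : Int), (0 : Int)), (1, 0), (0, -1), (0, 1)]).foldl
      (fun (acc : List (List Bool) × List (Int × Int)) d =>
        if 0 ≤ c.1 + d.1 ∧ c.1 + d.1 < (g.length : Int) ∧ 0 ≤ c.2 + d.2 ∧ c.2 + d.2 < pvCols g ∧
            pvGetB acc.1 (c.1 + d.1) (c.2 + d.2) = false ∧ pvGetS g (c.1 + d.1) (c.2 + d.2) ≠ "#" then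
          (pvSetB acc.1 (c.1 + d.1) (c.2 + d.2), acc.2 ++ [(c.1 + d.1, c.2 + d.2)])
        else acc)
      (v, st))
    = (pvMark ((pvNbrs c).filter (fun n => @decide (pvOk g v n) (pvOkDec g v n))) v,
       st ++ (pvNbrs c).filter (fun n => @decide (pvOk g v n) (pvOkDec g v n))) := by
  have hmap : ([((-1 : Int), (0 : Int)), (1, 0), (0, -1), (0, 1)]).map
      (fun d => (c.1 + d.1, c.2 + d.2)) = pvNbrs c := by
    simp [pvNbrs, Prod.ext_iff]
    omega
  have h := pv_foldA_gen c [((-1 : Int), (0 : Int)), (1, 0), (0, -1), (0, 1)] v st hs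
    (by rw [hmap]; exact pv_nbrs_nodup c)
  rw [hmap] at h
  exact h

theorem pv_loopA (g : List (List String)) :
    ∀ (f : Nat) (W : List (Int × Int)) (v : List (List Bool)) (cnt : Int),
    pvShape g v → 2 * pvFalses v + W.length + 1 ≤ f →
    pvLoopA f W g v cnt = cnt + pvDsum g W + pvDcnt g {q | pvRch g v (W.flatMap pvNbrs) q} := by
  intro f
  induction f with
  | zero => intro W v cnt _ hf; omega
  | succ f ih =>
    intro W v cnt hs hf
    rcases hW : W.getLast? with _ | c
    · have hWnil : W = [] := List.getLast?_eq_none_iff.mp hW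
      subst hWnil
      have hset : {q | pvRch g v ([] : List (Int × Int)) q}
          = (∅ : Set (Int × Int)) := by
        ext q
        simp only [Set.mem_setOf_eq, Set.mem_empty_iff_false, iff_false]
        exact pvRch_nil
      simp [pvLoopA, hW, pvDsum, hset, pvDcnt_empty]
    · have hWeq : W.dropLast ++ [c] = W := List.dropLast_append_getLast? c hW
      set W₀ := W.dropLast with hW₀
      set N := (pvNbrs c).filter (fun n => @decide (pvOk g v n) (pvOkDec g v n)) with hN
      have hNmem : ∀ n, n ∈ N ↔ (n ∈ pvNbrs c ∧ pvOk g v n) := by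
        intro n
        simp [hN, List.mem_filter]
      have hNinR : ∀ n ∈ N, pvInR g n := fun n hn => ((hNmem n).mp hn).2.1
      have hNnd : N.Nodup := (pv_nbrs_nodup c).filter _
      have hNun : ∀ n ∈ N, pvGetB v n.1 n.2 = false := fun n hn => ((hNmem n).mp hn).2.2.1
      have hsN : pvShape g (pvMark N v) := pv_shape_mark hs hNinR
      have hfalses : pvFalses (pvMark N v) + N.length = pvFalses v :=
        pv_falses_mark hs hNinR hNnd hNun
      have hlen : W₀.length + 1 = W.length := by
        conv_rhs => rw [← hWeq]
        simp
      have hstep : pvLoopA (f+1) W g v cnt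
          = pvLoopA f (W₀ ++ N) g (pvMark N v)
              (if pvGetS g c.1 c.2 = "D" then cnt + 1 else cnt) := by
        simp only [pvLoopA, hW]
        rw [pv_foldA c v W₀ hs]
      rw [hstep, ih _ _ _ hsN (by simp only [List.length_append]; omega)]
      have e1 : {q | pvRch g (pvMark N v) ((W₀ ++ N).flatMap pvNbrs) q}
          = {q | pvRch g (pvMark N v) (N.flatMap pvNbrs ++ W₀.flatMap pvNbrs) q} := by
        ext q
        apply pvRch_congr_mem
        intro a
        simp only [List.mem_flatMap, List.mem_append]
        constructor
        · rintro ⟨p, hp | hp, hq⟩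
          · exact Or.inr ⟨p, hp, hq⟩
          · exact Or.inl ⟨p, hp, hq⟩
        · rintro (⟨p, hp, hq⟩ | ⟨p, hp, hq⟩)
          · exact ⟨p, Or.inr hp, hq⟩
          · exact ⟨p, Or.inl hp, hq⟩
      have e2 : {q | pvRch g v (W.flatMap pvNbrs) q}
          = {q | q ∈ N} ∪ {q | pvRch g (pvMark N v) (N.flatMap pvNbrs ++ W₀.flatMap pvNbrs) q} := by
        ext q
        have hmm : pvRch g v (W.flatMap pvNbrs) q
            ↔ pvRch g v (pvNbrs c ++ W₀.flatMap pvNbrs) q := by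
          apply pvRch_congr_mem
          intro a
          conv_lhs => rw [← hWeq]
          simp only [List.mem_flatMap, List.mem_append, List.flatMap_append, List.flatMap_cons,
            List.flatMap_nil, List.append_nil]
          exact or_comm
        rw [Set.mem_setOf_eq, hmm,
          pv_eager hNmem (fun a ha => pv_getB_mark hs hNinR ha) q]
        simp
      have e3 : pvDcnt g ({q | q ∈ N}
            ∪ {q | pvRch g (pvMark N v) (N.flatMap pvNbrs ++ W₀.flatMap pvNbrs) q})
          = pvDsum g N
            + pvDcnt g {q | pvRch g (pvMark N v) (N.flatMap pvNbrs ++ W₀.flatMap pvNbrs) q} := by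
        apply pvDcnt_list_union hNnd
        · intro n hn hY
          have hok := pvRch_ok hY
          have : pvGetB (pvMark N v) n.1 n.2 = true := by
            rw [pv_getB_mark hs hNinR (hNinR n hn)]
            simp [hn]
          rw [hok.2.1] at this
          exact Bool.false_ne_true this
        · exact pvRch_finite g _ _
      have e4 : pvDsum g W = pvDsum g W₀ + pvD g c := by
        conv_lhs => rw [← hWeq]
        simp [pvDsum]
      have e5 : pvDsum g (W₀ ++ N) = pvDsum g W₀ + pvDsum g N := by
        simp [pvDsum]
      rw [e1, e2, e3, e4, e5]
      by_cases hD : pvGetS g c.1 c.2 = "D" <;> simp [pvD, hD] <;> ring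

-- invariants of B's mutual recursion: pvBCellProp f says a call on an admissible cell returns
-- the diamond count of everything reachable from it and marks exactly that set; pvBDirsProp f
-- says the directions walk does the same for the worklist of the four shifted cells
def pvBCellProp (g : List (List String)) (f : Nat) : Prop :=
  ∀ (c : Int × Int) (v : List (List Bool)), pvShape g v → pvOk g v c → pvFalses v ≤ f →
    pvShape g (pvDfsB f c.1 c.2 g v).2 ∧
    (pvDfsB f c.1 c.2 g v).1 = pvDcnt g {q | pvRch g v [c] q} ∧
    (∀ a : Int × Int, pvInR g a →
      (pvGetB (pvDfsB f c.1 c.2 g v).2 a.1 a.2 = true ↔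
        pvGetB v a.1 a.2 = true ∨ pvRch g v [c] a)) ∧
    pvFalses (pvDfsB f c.1 c.2 g v).2 + 1 ≤ pvFalses v

def pvBDirsProp (g : List (List String)) (f : Nat) : Prop :=
  ∀ (x y : Int) (ds : List (Int × Int)) (v : List (List Bool)) (cnt : Int),
    pvShape g v → pvFalses v ≤ f →
    pvShape g (pvDfsBDirs f x y g ds (cnt, v)).2 ∧
    (pvDfsBDirs f x y g ds (cnt, v)).1
      = cnt + pvDcnt g {q | pvRch g v (ds.map fun d => (x + d.1, y + d.2)) q} ∧
    (∀ a : Int × Int, pvInR g a →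
      (pvGetB (pvDfsBDirs f x y g ds (cnt, v)).2 a.1 a.2 = true ↔
        pvGetB v a.1 a.2 = true ∨ pvRch g v (ds.map fun d => (x + d.1, y + d.2)) a)) ∧
    pvFalses (pvDfsBDirs f x y g ds (cnt, v)).2 ≤ pvFalses v

theorem pvB_dirs (g : List (List String)) (f : Nat) (hP : pvBCellProp g f) :
    pvBDirsProp g f := by
  intro x y ds
  induction ds with
  | nil =>
    intro v cnt hs hf
    have h0 : pvDfsBDirs f x y g [] (cnt, v) = (cnt, v) := by simp [pvDfsBDirs]
    rw [h0]
    have hset : {q | pvRch g v (([] : List (Int × Int)).map fun d => (x + d.1, y + d.2)) q}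
        = (∅ : Set (Int × Int)) := by
      ext q
      simp only [List.map_nil, Set.mem_setOf_eq, Set.mem_empty_iff_false, iff_false]
      exact pvRch_nil
    refine ⟨hs, ?_, ?_, le_refl _⟩
    · have hset2 : {q | pvRch g v ([] : List (Int × Int)) q} = (∅ : Set (Int × Int)) := by
        ext q
        simp only [Set.mem_setOf_eq, Set.mem_empty_iff_false, iff_false]
        exact pvRch_nil
      simp [hset2, pvDcnt_empty]
    · intro a _
      simp only [List.map_nil]
      constructor
      · intro h; exact Or.inl h
      · rintro (h | h)
        · exact h
        · exact absurd h pvRch_nil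
  | cons d ds ih =>
    intro v cnt hs hf
    set n : Int × Int := (x + d.1, y + d.2) with hn
    have hcond : (0 ≤ x + d.1 ∧ x + d.1 < (g.length : Int) ∧ 0 ≤ y + d.2 ∧ y + d.2 < pvCols g ∧
        pvGetB v (x + d.1) (y + d.2) = false ∧ pvGetS g (x + d.1) (y + d.2) ≠ "#")
        ↔ pvOk g v n := by
      unfold pvOk pvInR
      simp only [hn]
      tauto
    have hmapcons : ((d :: ds).map fun d' => (x + d'.1, y + d'.2))
        = [n] ++ (ds.map fun d' => (x + d'.1, y + d'.2)) := by
      simp [hn]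
    by_cases hok : pvOk g v n
    · have hstep : pvDfsBDirs f x y g (d :: ds) (cnt, v)
          = pvDfsBDirs f x y g ds (cnt + (pvDfsB f n.1 n.2 g v).1, (pvDfsB f n.1 n.2 g v).2) := by
        simp only [pvDfsBDirs]
        rw [if_pos (hcond.mpr hok)]
      obtain ⟨hsr, hcntr, hcharr, hfallr⟩ := hP n v hs hok hf
      obtain ⟨hs2, hcnt2, hchar2, hfall2⟩ :=
        ih (pvDfsB f n.1 n.2 g v).2 (cnt + (pvDfsB f n.1 n.2 g v).1) hsr (by omega)
      have hseq := pv_seq (g := g) (v := v) (v' := (pvDfsB f n.1 n.2 g v).2)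
        (L1 := [n]) (L2 := ds.map fun d' => (x + d'.1, y + d'.2)) hcharr
      have hsetsplit : {q | pvRch g v ((d :: ds).map fun d' => (x + d'.1, y + d'.2)) q}
          = {q | pvRch g v [n] q}
            ∪ {q | pvRch g (pvDfsB f n.1 n.2 g v).2 (ds.map fun d' => (x + d'.1, y + d'.2)) q} := by
        ext q
        rw [Set.mem_setOf_eq, hmapcons, hseq q]
        rfl
      have hdisj : ∀ q, q ∈ {q | pvRch g v [n] q} →
          q ∉ {q | pvRch g (pvDfsB f n.1 n.2 g v).2 (ds.map fun d' => (x + d'.1, y + d'.2)) q} := by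
        intro q hq hq'
        have hokq := pvRch_ok hq'
        have htrue : pvGetB (pvDfsB f n.1 n.2 g v).2 q.1 q.2 = true :=
          (hcharr q hokq.1).mpr (Or.inr hq)
        rw [hokq.2.1] at htrue
        exact Bool.false_ne_true htrue
      have hcadd : pvDcnt g {q | pvRch g v ((d :: ds).map fun d' => (x + d'.1, y + d'.2)) q}
          = pvDcnt g {q | pvRch g v [n] q}
            + pvDcnt g {q | pvRch g (pvDfsB f n.1 n.2 g v).2 (ds.map fun d' => (x + d'.1, y + d'.2)) q} := by
        rw [hsetsplit]
        exact pvDcnt_union hdisj (pvRch_finite g _ _) (pvRch_finite g _ _)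
      refine ⟨by rw [hstep]; exact hs2, ?_, ?_, ?_⟩
      · rw [hstep, hcnt2, hcadd, hcntr]
        ring
      · intro a ha
        rw [hstep]
        rw [hchar2 a ha, hcharr a ha, hmapcons]
        rw [hseq a]
        tauto
      · rw [hstep]
        omega
    · have hstep : pvDfsBDirs f x y g (d :: ds) (cnt, v) = pvDfsBDirs f x y g ds (cnt, v) := by
        simp only [pvDfsBDirs]
        rw [if_neg (fun h => hok (hcond.mp h))]
      obtain ⟨hs2, hcnt2, hchar2, hfall2⟩ := ih v cnt hs hf
      have hsame : ∀ q, pvRch g v ((d :: ds).map fun d' => (x + d'.1, y + d'.2)) q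
          ↔ pvRch g v (ds.map fun d' => (x + d'.1, y + d'.2)) q := by
        intro q
        rw [show ((d :: ds).map fun d' => (x + d'.1, y + d'.2))
            = n :: (ds.map fun d' => (x + d'.1, y + d'.2)) by simp [hn]]
        exact pvRch_cons_not_ok hok
      have hseteq : {q | pvRch g v ((d :: ds).map fun d' => (x + d'.1, y + d'.2)) q}
          = {q | pvRch g v (ds.map fun d' => (x + d'.1, y + d'.2)) q} := by
        ext q
        exact hsame q
      refine ⟨by rw [hstep]; exact hs2, ?_, ?_, by rw [hstep]; exact hfall2⟩
      · rw [hstep, hcnt2, hseteq]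
      · intro a ha
        rw [hstep, hchar2 a ha, hsame a]

theorem pvB_cell_succ (g : List (List String)) (f : Nat) (hQ : pvBDirsProp g f) :
    pvBCellProp g (f+1) := by
  intro c v hs hok hf
  have hinR := hok.1
  have hsl := hs.1
  have hs1 : pvShape g (pvSetB v c.1 c.2) :=
    pv_shape_set c.1 c.2 hs (by have := hinR.1; omega) (by have := hinR.2.1; omega)
  have hfall1 : pvFalses (pvSetB v c.1 c.2) + 1 = pvFalses v :=
    pv_falses_set hs hinR hok.2.1
  have hstep : pvDfsB (f+1) c.1 c.2 g v
      = pvDfsBDirs f c.1 c.2 g [((-1 : Int), (0 : Int)), (1, 0), (0, -1), (0, 1)]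
          ((if pvGetS g c.1 c.2 = "D" then 1 else 0), pvSetB v c.1 c.2) := by
    simp only [pvDfsB]
  obtain ⟨hs2, hcnt2, hchar2, hfall2⟩ :=
    hQ c.1 c.2 [((-1 : Int), (0 : Int)), (1, 0), (0, -1), (0, 1)] (pvSetB v c.1 c.2)
      (if pvGetS g c.1 c.2 = "D" then 1 else 0) hs1 (by omega)
  have hmap : ([((-1 : Int), (0 : Int)), (1, 0), (0, -1), (0, 1)]).map
      (fun d => (c.1 + d.1, c.2 + d.2)) = pvNbrs c := by
    have := pv_map_dirs c.1 c.2
    simpa using this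
  rw [hmap] at hcnt2 hchar2
  -- reachability from [c] = {c} plus reachability from its neighbours after marking c
  have hNc : ∀ n, n ∈ [c] ↔ (n ∈ [c] ∧ pvOk g v n) := by
    intro n
    simp only [List.mem_singleton]
    constructor
    · rintro rfl; exact ⟨rfl, hok⟩
    · rintro ⟨h, _⟩; exact h
  have hv' : ∀ a, pvInR g a →
      pvGetB (pvSetB v c.1 c.2) a.1 a.2 = (pvGetB v a.1 a.2 || decide (a ∈ [c])) := by
    intro a ha
    rw [pv_getB_set hs hinR ha]
    simp
  have heag := pv_eager (T := ([] : List (Int × Int))) hNc hv'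
  simp only [List.append_nil, List.flatMap_cons, List.flatMap_nil] at heag
  have hsplit : ∀ q, pvRch g v [c] q
      ↔ (q = c ∨ pvRch g (pvSetB v c.1 c.2) (pvNbrs c) q) := by
    intro q
    rw [heag q]
    simp
  have hcnotin : c ∉ {q | pvRch g (pvSetB v c.1 c.2) (pvNbrs c) q} := by
    intro hmem
    have hokc := pvRch_ok hmem
    have : pvGetB (pvSetB v c.1 c.2) c.1 c.2 = true := by
      rw [pv_getB_set hs hinR hinR]
      simp
    rw [hokc.2.1] at this
    exact Bool.false_ne_true this
  have hseteq : {q | pvRch g v [c] q}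
      = insert c {q | pvRch g (pvSetB v c.1 c.2) (pvNbrs c) q} := by
    ext q
    rw [Set.mem_setOf_eq, hsplit q, Set.mem_insert_iff]
    rfl
  refine ⟨by rw [hstep]; exact hs2, ?_, ?_, ?_⟩
  · rw [hstep, hcnt2, hseteq, pvDcnt_insert hcnotin (pvRch_finite g _ _)]
    unfold pvD
    by_cases hD : pvGetS g c.1 c.2 = "D" <;> simp [hD]
  · intro a ha
    rw [hstep, hchar2 a ha, hsplit a]
    have hba : pvGetB (pvSetB v c.1 c.2) a.1 a.2 = (pvGetB v a.1 a.2 || decide (a = c)) :=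
      pv_getB_set hs hinR ha
    rw [hba]
    by_cases hac : a = c <;> simp [hac]
  · rw [hstep]
    omega

theorem pvB_cell_zero (g : List (List String)) : pvBCellProp g 0 := by
  intro c v hs hok hf
  have := pv_falses_pos hs hok.1 hok.2.1
  omega

theorem pvB_cell_all (g : List (List String)) : ∀ f, pvBCellProp g f := by
  intro f
  induction f with
  | zero => exact pvB_cell_zero g
  | succ f ih => exact pvB_cell_succ g f (pvB_dirs g f ih)

theorem pv_dfs_eq (x : Int) (y : Int) (grid : List (List String)) (visited : List (List Bool))
    (hpre : Pre_dfs x y grid visited) : dfs x y grid visited = dfs_alt x y grid visited := by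
  obtain ⟨hne, hrect, hvl, hvr, hx1, hx2, hy1, hy2⟩ := hpre
  have hs0 : pvShape grid visited := ⟨hvl, hvr⟩
  have hs1 : pvShape grid (pvSetB visited x y) :=
    pv_shape_set x y hs0 (by omega) (by omega)
  set v1 := pvSetB visited x y with hv1
  set F := pvFalses v1 with hF
  set c : Int × Int := (x, y) with hc
  set N := (pvNbrs c).filter (fun n => @decide (pvOk grid v1 n) (pvOkDec grid v1 n)) with hN
  have hNmem : ∀ n, n ∈ N ↔ (n ∈ pvNbrs c ∧ pvOk grid v1 n) := by
    intro n
    simp [hN, List.mem_filter]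
  have hNinR : ∀ n ∈ N, pvInR grid n := fun n hn => ((hNmem n).mp hn).2.1
  have hNnd : N.Nodup := (pv_nbrs_nodup c).filter _
  have hNun : ∀ n ∈ N, pvGetB v1 n.1 n.2 = false := fun n hn => ((hNmem n).mp hn).2.2.1
  have hsN : pvShape grid (pvMark N v1) := pv_shape_mark hs1 hNinR
  have hfalses : pvFalses (pvMark N v1) + N.length = F := pv_falses_mark hs1 hNinR hNnd hNun
  -- A side
  have hA1 : dfs x y grid visited
      = pvLoopA (2 * F + 1) N grid (pvMark N v1)
          (if pvGetS grid c.1 c.2 = "D" then 0 + 1 else 0) := by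
    have key : ∀ f' : Nat, pvLoopA (f' + 1) [c] grid v1 0
        = pvLoopA f' N grid (pvMark N v1)
            (if pvGetS grid c.1 c.2 = "D" then 0 + 1 else 0) := by
      intro f'
      have hgl : ([c] : List (Int × Int)).getLast? = some c := rfl
      have hdl : ([c] : List (Int × Int)).dropLast = [] := rfl
      simp only [pvLoopA, hgl, hdl]
      rw [pv_foldA c v1 [] hs1]
      simp [hN]
    show pvLoopA (2 * F + 1 + 1) [c] grid v1 0 = _
    exact key (2 * F + 1)
  have hA : dfs x y grid visited
      = (if pvGetS grid c.1 c.2 = "D" then (1 : Int) else 0) + pvDsum grid N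
          + pvDcnt grid {q | pvRch grid (pvMark N v1) (N.flatMap pvNbrs) q} := by
    rw [hA1, pv_loopA grid _ _ _ _ hsN (by omega)]
    by_cases hD : pvGetS grid c.1 c.2 = "D" <;> simp [hD]
  -- B side: unfold one recursion step, then the directions invariant
  have hB : dfs_alt x y grid visited
      = (if pvGetS grid c.1 c.2 = "D" then (1 : Int) else 0)
          + pvDcnt grid {q | pvRch grid v1 (pvNbrs c) q} := by
    have hstep : dfs_alt x y grid visited
        = (pvDfsBDirs F x y grid [((-1 : Int), (0 : Int)), (1, 0), (0, -1), (0, 1)]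
            ((if pvGetS grid x y = "D" then 1 else 0), v1)).1 := by
      show (pvDfsB (F + 1) x y grid visited).1 = _
      simp only [pvDfsB]
      rfl
    obtain ⟨_, hcnt2, _, _⟩ :=
      pvB_dirs grid F (pvB_cell_all grid F) x y
        [((-1 : Int), (0 : Int)), (1, 0), (0, -1), (0, 1)] v1
        (if pvGetS grid x y = "D" then 1 else 0) hs1 (le_refl F)
    have hmap : ([((-1 : Int), (0 : Int)), (1, 0), (0, -1), (0, 1)]).map
        (fun d => (x + d.1, y + d.2)) = pvNbrs c := pv_map_dirs x y
    rw [hmap] at hcnt2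
    rw [hstep, hcnt2]
  -- bridge
  have hE := pv_eager (g := grid) (v := v1) (v' := pvMark N v1) (T := [])
    hNmem (fun a ha => pv_getB_mark hs1 hNinR ha)
  simp only [List.append_nil] at hE
  have e2 : {q | pvRch grid v1 (pvNbrs c) q}
      = {q | q ∈ N} ∪ {q | pvRch grid (pvMark N v1) (N.flatMap pvNbrs) q} := by
    ext q
    rw [Set.mem_setOf_eq, hE q]
    simp
  have e3 : pvDcnt grid ({q | q ∈ N} ∪ {q | pvRch grid (pvMark N v1) (N.flatMap pvNbrs) q})
      = pvDsum grid N + pvDcnt grid {q | pvRch grid (pvMark N v1) (N.flatMap pvNbrs) q} := by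
    apply pvDcnt_list_union hNnd
    · intro n hn hY
      have hokc := pvRch_ok hY
      have hgb : pvGetB (pvMark N v1) n.1 n.2 = true := by
        rw [pv_getB_mark hs1 hNinR (hNinR n hn)]
        simp [hn]
      rw [hokc.2.1] at hgb
      exact Bool.false_ne_true hgb
    · exact pvRch_finite grid _ _
  rw [hA, hB, e2, e3]
  ring

-- ===== VERDICT (by name: the statement is the Claim_ definition above) =====
theorem dfs_spec : Claim_equal_dfs := by
  intro x y grid visited _ hpre
  unfold Spec_dfs
  exact pv_dfs_eq x y grid visited hpre
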